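-- pv_equiv track=rewrite | github.com/KarboniteKream/advent-of-code | 07.py | part1
-- ===== SOURCE A (Python) =====
-- def part1(input):
--     data = {}
--
--     for name, bags in input.items():
--         for bag, _ in bags:
--             data.setdefault(bag, []).append(name)
--
--     result = set()
--     bags = {"shiny gold"}
--
--     while bags:
--         bags = {b for bag in bags for b in data.get(bag, [])}
--         result |= bags
--
--     return len(result)
-- ===== SOURCE B (Python) =====
-- def part1(input):
--     # Jacobi-style fixpoint: repeatedly scan the rules, marking every bag whose
--     # contents include "shiny gold" or an already-marked bag, until stable.
--     can = set()
--     while True: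
--         newly = {name for name, bags in input.items()
--                  if name not in can
--                  and any(b == "shiny gold" or b in can for b, _ in bags)}
--         if not newly:
--             break
--         can |= newly
--     return len(can)
-- ===== Notes on version B (the rewrite author's own statement) =====
-- stated objective: alternative
-- what changed: A builds a reverse containment map and expands a frontier set level by level from 'shiny gold'; B builds no graph at all and instead runs a dataflow-style fixpoint: it repeatedly scans the rule list, marking each bag whose contents mention 'shiny gold' or an already-marked bag, until a full scan adds nothing (so B also terminates on cyclic rule sets where A loops forever).
import Mathlib
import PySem

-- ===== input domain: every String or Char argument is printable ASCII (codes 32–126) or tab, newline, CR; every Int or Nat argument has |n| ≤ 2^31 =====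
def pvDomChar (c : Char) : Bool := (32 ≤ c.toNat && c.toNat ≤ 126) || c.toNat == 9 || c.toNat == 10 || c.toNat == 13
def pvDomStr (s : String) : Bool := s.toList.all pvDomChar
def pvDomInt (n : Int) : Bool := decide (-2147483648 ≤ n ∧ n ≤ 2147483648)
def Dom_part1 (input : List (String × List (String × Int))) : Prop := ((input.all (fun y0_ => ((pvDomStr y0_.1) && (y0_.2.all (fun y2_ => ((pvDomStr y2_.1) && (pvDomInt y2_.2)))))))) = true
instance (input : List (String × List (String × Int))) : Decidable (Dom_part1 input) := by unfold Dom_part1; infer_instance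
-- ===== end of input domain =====

-- B replaces A's reverse-map + frontier expansion with a dataflow fixpoint that scans the rule
-- list, marking bags whose contents mention "shiny gold" or a marked bag, until a scan adds
-- nothing; the returned count is proved equal.

-- ===== PORT A =====
-- A's 'while bags:' loop, fuel-bounded; the fuel passed by part1 (edge count + 3) exceeds the
-- number of rounds the Python loop runs on every input where it terminates (on an acyclic graph
-- a round k with nonempty 'bags' needs a simple containment path of length k, so rounds ≤ edges + 2).
def part1LoopA (data : PySem.Dict String (List String)) :
    Nat → PySem.Set String → PySem.Set String → PySem.Set String
  | 0, result, _ => result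
  | fuel+1, result, bags =>
    if bags.isEmpty then result
    else
      -- bags = {b for bag in bags for b in data.get(bag, [])}
      let next := bags.foldl (fun acc bag => PySem.Set.update acc (data.getD bag [])) PySem.Set.empty
      -- result |= bags
      part1LoopA data fuel (PySem.Set.union result next) next

def part1 (input : List (String × List (String × Int))) : Int :=
  let items := (PySem.Dict.ofList input).items
  -- data.setdefault(bag, []).append(name)
  let data := items.foldl
    (fun d p => p.2.foldl (fun d bp => d.modify bp.1 [] (· ++ [p.1])) d)
    (PySem.Dict.empty : PySem.Dict String (List String))
  let fuel := (items.map (fun p => p.2.length)).sum + 3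
  let result := part1LoopA data fuel PySem.Set.empty (PySem.Set.ofList ["shiny gold"])
  PySem.Set.len result

-- ===== PORT B =====
-- one scan of the rules: {name for name, bags in input.items()
--                         if name not in can and any(b == "shiny gold" or b in can for b, _ in bags)}
def part1PassB (items : List (String × List (String × Int))) (can : PySem.Set String) :
    PySem.Set String :=
  PySem.Set.ofList ((items.filter (fun p =>
      !(PySem.Set.contains can p.1) &&
      p.2.any (fun bp => bp.1 == "shiny gold" || PySem.Set.contains can bp.1))).map (fun p => p.1))

-- B's 'while True: … if not newly: break' loop, fuel-bounded; the fuel passed by part1_alt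
-- (edge count + 3) exceeds the number of scans the Python loop runs: every scan before the last
-- adds at least one name that owns at least one edge, and those names are distinct, so scans ≤ edges + 2.
def part1LoopB (items : List (String × List (String × Int))) :
    Nat → PySem.Set String → PySem.Set String
  | 0, can => can
  | fuel+1, can =>
    let newly := part1PassB items can
    if newly.isEmpty then can
    else part1LoopB items fuel (PySem.Set.union can newly)

def part1_alt (input : List (String × List (String × Int))) : Int :=
  let items := (PySem.Dict.ofList input).items
  let fuel := (items.map (fun p => p.2.length)).sum + 3
  PySem.Set.len (part1LoopB items fuel PySem.Set.empty)

-- ===== PRECONDITION & SPEC =====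
-- No Pre_: the proved fueled-port equivalence is unconditional (on inputs with a containment
-- cycle reachable from "shiny gold" the Python A never returns, so nothing is claimed there).
def Spec_part1 (input : List (String × List (String × Int))) (out : Int) : Prop := out = part1_alt input
instance (input : List (String × List (String × Int))) (out : Int) : Decidable (Spec_part1 input out) := by unfold Spec_part1; infer_instance

-- ===== CLAIM (what is proved, stated in full; the proofs are below) =====
def Claim_equal_part1 : Prop := ∀ (input : List (String × List (String × Int))), Dom_part1 input → Spec_part1 input (part1 input)

-- ===== LEMMAS AND PROOFS =====

-- membership in A's per-round set comprehension
theorem mem_foldl_update (d : PySem.Dict String (List String)) (l : List String)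
    (acc : PySem.Set String) (x : String) :
    x ∈ l.foldl (fun a v => PySem.Set.update a (d.getD v [])) acc ↔
      x ∈ acc ∨ ∃ v ∈ l, x ∈ d.getD v [] := by
  induction l generalizing acc with
  | nil => simp
  | cons v vs ih => simp [ih, PySem.Set.mem_update]; tauto

-- membership in B's per-scan set comprehension
theorem mem_passB (items : List (String × List (String × Int))) (can : PySem.Set String)
    (x : String) :
    x ∈ part1PassB items can ↔
      x ∉ can ∧ ∃ p ∈ items, p.1 = x ∧ ∃ bp ∈ p.2, bp.1 = "shiny gold" ∨ bp.1 ∈ can := by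
  simp only [part1PassB, PySem.Set.mem_ofList, List.mem_map, List.mem_filter, Bool.and_eq_true,
    Bool.not_eq_true', List.any_eq_true, Bool.or_eq_true, beq_iff_eq,
    PySem.Set.contains_eq_listContains, List.contains_eq_mem, decide_eq_true_eq,
    decide_eq_false_iff_not]
  constructor
  · rintro ⟨p, ⟨hp, hx, hb⟩, rfl⟩
    exact ⟨hx, p, hp, rfl, hb⟩
  · rintro ⟨hx, p, hp, rfl, hb⟩
    exact ⟨p, ⟨hp, hx, hb⟩, rfl⟩

-- A's nested dict-building loop equals a fold over the flattened edge list
theorem build_eq (items : List (String × List (String × Int))) (d0 : PySem.Dict String (List String)) :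
    items.foldl (fun d p => p.2.foldl (fun d bp => d.modify bp.1 [] (· ++ [p.1])) d) d0 =
    (items.flatMap (fun p => p.2.map (fun bp => (bp.1, p.1)))).foldl
      (fun d e => d.modify e.1 [] (· ++ [e.2])) d0 := by
  induction items generalizing d0 with
  | nil => rfl
  | cons p ps ih => simp [List.foldl_append, List.foldl_map, ih]

-- membership in the reverse map A builds, read back on the rule list
theorem mem_dataA (items : List (String × List (String × Int))) (v x : String) :
    x ∈ (items.foldl
        (fun d p => p.2.foldl (fun d bp => d.modify bp.1 [] (· ++ [p.1])) d)
        (PySem.Dict.empty : PySem.Dict String (List String))).getD v [] ↔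
      ∃ p ∈ items, p.1 = x ∧ ∃ bp ∈ p.2, bp.1 = v := by
  rw [build_eq, PySem.Dict.getD_foldl_modify_append]
  simp only [PySem.Dict.getD_empty, List.nil_append, List.mem_map, List.mem_filter,
    List.mem_flatMap, beq_iff_eq]
  constructor
  · rintro ⟨e, ⟨⟨p, hp, bp, hbp, rfl⟩, hv⟩, rfl⟩
    exact ⟨p, hp, rfl, bp, hbp, hv⟩
  · rintro ⟨p, hp, rfl, bp, hbp, hv⟩
    exact ⟨(bp.1, p.1), ⟨⟨p, hp, bp, hbp, rfl⟩, hv⟩, rfl⟩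

-- once everything A can still reach is already in result, further rounds change nothing
theorem loopA_closed (d : PySem.Dict String (List String)) (F : Nat) :
    ∀ (result bags : PySem.Set String),
    (∀ v ∈ bags, ∀ b ∈ d.getD v [], b ∈ result) →
    (∀ v ∈ result, ∀ b ∈ d.getD v [], b ∈ result) →
    ∀ x, x ∈ part1LoopA d F result bags ↔ x ∈ result := by
  induction F with
  | zero => intro result bags _ _ x; rfl
  | succ F ih =>
    intro result bags h1 h2 x
    by_cases hb : bags.isEmpty
    · simp [part1LoopA, hb]
    · simp only [part1LoopA, hb, Bool.false_eq_true, if_neg, not_false_iff]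
      have hnext : ∀ y, y ∈ bags.foldl (fun acc bag => PySem.Set.update acc (d.getD bag [])) PySem.Set.empty →
          y ∈ result := by
        intro y hy
        rw [mem_foldl_update] at hy
        rcases hy with h | ⟨v, hv, hy⟩
        · simp [PySem.Set.empty] at h
        · exact h1 v hv y hy
      have hres : ∀ y, y ∈ PySem.Set.union result (bags.foldl (fun acc bag => PySem.Set.update acc (d.getD bag [])) PySem.Set.empty) ↔ y ∈ result := by
        intro y
        rw [PySem.Set.mem_union]
        constructor
        · rintro (h | h)
          · exact h
          · exact hnext y h
        · exact Or.inl
      rw [ih _ _ ?_ ?_ x]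
      · exact hres x
      · intro v hv b hb'
        exact (hres b).mpr (h2 v (hnext v hv) b hb')
      · intro v hv b hb'
        exact (hres b).mpr (h2 v ((hres v).mp hv) b hb')


-- the simulation: A's frontier iteration and B's rule-scan fixpoint compute the same set,
-- round for round.  Invariants: (i) B's marks = A's result; (ii) A's frontier lies inside
-- result ∪ {"shiny gold"}; (iii) everything one step from a marked bag (or gold) is already in
-- result or one step from the frontier.
theorem simAB (items : List (String × List (String × Int)))
    (d : PySem.Dict String (List String))
    (hd : ∀ v x, x ∈ d.getD v [] ↔ ∃ p ∈ items, p.1 = x ∧ ∃ bp ∈ p.2, bp.1 = v)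
    (F : Nat) :
    ∀ (R L M : PySem.Set String),
    (∀ x, x ∈ M ↔ x ∈ R) →
    (∀ v ∈ L, v ∈ R ∨ v = "shiny gold") →
    (∀ v, (v ∈ M ∨ v = "shiny gold") → ∀ b ∈ d.getD v [], b ∈ R ∨ ∃ u ∈ L, b ∈ d.getD u []) →
    ∀ x, x ∈ part1LoopA d F R L ↔ x ∈ part1LoopB items F M := by
  have hpass : ∀ (M : PySem.Set String) (x : String),
      x ∈ part1PassB items M ↔ x ∉ M ∧ ∃ v, (v = "shiny gold" ∨ v ∈ M) ∧ x ∈ d.getD v [] := by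
    intro M x
    rw [mem_passB]
    constructor
    · rintro ⟨hx, p, hp, rfl, bp, hbp, hv⟩
      exact ⟨hx, bp.1, hv, (hd bp.1 p.1).mpr ⟨p, hp, rfl, bp, hbp, rfl⟩⟩
    · rintro ⟨hx, v, hv, hxd⟩
      obtain ⟨p, hp, rfl, bp, hbp, rfl⟩ := (hd v x).mp hxd
      exact ⟨hx, p, hp, rfl, bp, hbp, hv⟩
  induction F with
  | zero => intro R L M h1 _ _ x; exact (h1 x).symm
  | succ F ih =>
    intro R L M h1 h2 h3 x
    by_cases hN : (part1PassB items M).isEmpty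
    · -- B adds nothing: everything one step from M ∪ {gold} is already in M
      have hcl : ∀ y, (∃ v, (v = "shiny gold" ∨ v ∈ M) ∧ y ∈ d.getD v []) → y ∈ M := by
        intro y hy
        by_contra hyM
        have : y ∈ part1PassB items M := (hpass M y).mpr ⟨hyM, hy⟩
        rw [List.isEmpty_iff] at hN
        simp [hN] at this
      have hA : ∀ y, y ∈ part1LoopA d (F+1) R L ↔ y ∈ R := by
        apply loopA_closed
        · intro v hv b hb
          rcases h2 v hv with hvR | rfl
          · exact (h1 b).mp (hcl b ⟨v, Or.inr ((h1 v).mpr hvR), hb⟩)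
          · exact (h1 b).mp (hcl b ⟨"shiny gold", Or.inl rfl, hb⟩)
        · intro v hv b hb
          exact (h1 b).mp (hcl b ⟨v, Or.inr ((h1 v).mpr hv), hb⟩)
      simp only [part1LoopB, hN, if_pos]
      rw [hA x]
      exact (h1 x).symm
    · -- B makes a scan; then A's frontier cannot be empty either
      have hLne : ¬ L.isEmpty := by
        intro hLe
        rw [List.isEmpty_iff] at hLe
        obtain ⟨y, hy⟩ := List.exists_mem_of_ne_nil _ (by simpa [List.isEmpty_iff] using hN)
        obtain ⟨hyM, v, hv, hyd⟩ := (hpass M y).mp hy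
        rcases hv with rfl | hvM
        · rcases h3 "shiny gold" (Or.inr rfl) y hyd with hyR | ⟨u, hu, _⟩
          · exact hyM ((h1 y).mpr hyR)
          · simp [hLe] at hu
        · rcases h3 v (Or.inl hvM) y hyd with hyR | ⟨u, hu, _⟩
          · exact hyM ((h1 y).mpr hyR)
          · simp [hLe] at hu
      simp only [part1LoopA, part1LoopB, hN, hLne, Bool.false_eq_true, if_neg, not_false_iff]
      set next := L.foldl (fun acc bag => PySem.Set.update acc (d.getD bag [])) PySem.Set.empty with hnext
      have mnext : ∀ y, y ∈ next ↔ ∃ v ∈ L, y ∈ d.getD v [] := by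
        intro y
        rw [hnext, mem_foldl_update]
        constructor
        · rintro (h | h)
          · simp [PySem.Set.empty] at h
          · exact h
        · exact Or.inr
      apply ih
      · -- (i)
        intro y
        rw [PySem.Set.mem_union, PySem.Set.mem_union, hpass M y, mnext y]
        constructor
        · rintro (hyM | ⟨hyM, v, hv, hyd⟩)
          · exact Or.inl ((h1 y).mp hyM)
          · rcases h3 v hv.symm y hyd with hyR | ⟨u, hu, hyu⟩
            · exact Or.inl hyR
            · exact Or.inr ⟨u, hu, hyu⟩
        · rintro (hyR | ⟨v, hvL, hyd⟩)
          · exact Or.inl ((h1 y).mpr hyR)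
          · by_cases hyM : y ∈ M
            · exact Or.inl hyM
            · refine Or.inr ⟨hyM, v, ?_, hyd⟩
              rcases h2 v hvL with hvR | rfl
              · exact Or.inr ((h1 v).mpr hvR)
              · exact Or.inl rfl
      · -- (ii)
        intro v hv
        exact Or.inl ((PySem.Set.mem_union _ _ _).mpr (Or.inr hv))
      · -- (iii)
        intro v hv b hb
        have step : (v ∈ M ∨ v = "shiny gold") →
            b ∈ PySem.Set.union R next ∨ ∃ u ∈ next, b ∈ d.getD u [] := by
          intro hvMg
          rcases h3 v hvMg b hb with hbR | ⟨u, hu, hbu⟩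
          · exact Or.inl ((PySem.Set.mem_union _ _ _).mpr (Or.inl hbR))
          · exact Or.inl ((PySem.Set.mem_union _ _ _).mpr (Or.inr ((mnext b).mpr ⟨u, hu, hbu⟩)))
        rcases hv with hv | rfl
        · rcases (PySem.Set.mem_union _ _ _).mp hv with hvM | hvNew
          · exact step (Or.inl hvM)
          · -- v was just marked: it is in R or one step from L
            obtain ⟨hvM, w, hw, hvd⟩ := (hpass M v).mp hvNew
            have : v ∈ R ∨ ∃ u ∈ L, v ∈ d.getD u [] := by
              rcases hw with rfl | hwM
              · exact h3 "shiny gold" (Or.inr rfl) v hvd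
              · exact h3 w (Or.inl hwM) v hvd
            rcases this with hvR | hvNext
            · exact step (Or.inl ((h1 v).mpr hvR))
            · exact Or.inr ⟨v, (mnext v).mpr hvNext, hb⟩
        · exact step (Or.inr rfl)

theorem nodup_loopA (d : PySem.Dict String (List String)) (F : Nat) :
    ∀ (result bags : PySem.Set String), result.Nodup → (part1LoopA d F result bags).Nodup := by
  induction F with
  | zero => intro result bags h; exact h
  | succ F ih =>
    intro result bags h
    by_cases hb : bags.isEmpty
    · simpa [part1LoopA, hb] using h
    · simp only [part1LoopA, hb, Bool.false_eq_true, if_neg, not_false_iff]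
      exact ih _ _ (PySem.Set.nodup_union _ _ h)

theorem nodup_loopB (items : List (String × List (String × Int))) (F : Nat) :
    ∀ (can : PySem.Set String), can.Nodup → (part1LoopB items F can).Nodup := by
  induction F with
  | zero => intro can h; exact h
  | succ F ih =>
    intro can h
    by_cases hn : (part1PassB items can).isEmpty
    · simpa [part1LoopB, hn] using h
    · simp only [part1LoopB, hn, Bool.false_eq_true, if_neg, not_false_iff]
      exact ih _ (PySem.Set.nodup_union _ _ h)

theorem part1_eq_alt (input : List (String × List (String × Int))) :
    part1 input = part1_alt input := by
  unfold part1 part1_alt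
  simp only []
  set items := (PySem.Dict.ofList input).items with hitems
  set d := items.foldl
    (fun d p => p.2.foldl (fun d bp => d.modify bp.1 [] (· ++ [p.1])) d)
    (PySem.Dict.empty : PySem.Dict String (List String)) with hd
  set F := (items.map (fun p => p.2.length)).sum + 3 with hF
  have hmem : ∀ x, x ∈ part1LoopA d F PySem.Set.empty (PySem.Set.ofList ["shiny gold"]) ↔
      x ∈ part1LoopB items F PySem.Set.empty := by
    have hof : PySem.Set.ofList ["shiny gold"] = ["shiny gold"] := rfl
    apply simAB items d (fun v x => mem_dataA items v x)
    · intro x; exact Iff.rfl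
    · intro v hv; rw [hof] at hv; simpa using hv
    · intro v hv b hb
      rcases hv with hv | rfl
      · exact absurd hv (List.not_mem_nil)
      · exact Or.inr ⟨"shiny gold", by rw [hof]; exact List.mem_cons_self, hb⟩
  have hA : (part1LoopA d F PySem.Set.empty (PySem.Set.ofList ["shiny gold"])).Nodup :=
    nodup_loopA d F _ _ List.nodup_nil
  have hB : (part1LoopB items F PySem.Set.empty).Nodup :=
    nodup_loopB items F _ List.nodup_nil
  have hperm := (List.perm_ext_iff_of_nodup hA hB).mpr hmem
  simp only [PySem.Set.len]
  exact_mod_cast hperm.length_eq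

-- ===== VERDICT (by name: the statement is the Claim_ definition above) =====
theorem part1_spec : Claim_equal_part1 := by
  intro input _
  exact part1_eq_alt input
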